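-- pv_equiv track=rewrite | github.com/kroker42/AoC2023 | elftasks.py | arrange_lenses
-- ===== SOURCE A (Python) =====
-- def hash(str):
--     hash_value = 0
--     for ch in str:
--         hash_value += ord(ch)
--         hash_value = (hash_value * 17) % 256
--     return hash_value
--
-- def parse_lens_instruction(instr):
--     if instr[-1] == '-':
--         return (instr[:-1], None)
--     else:
--         return (instr[:-2], int(instr[-1]))
--
-- def arrange_lenses(instructions):
--     lenses = [{} for i in range(256)]
--     for instr in instructions:
--         label = parse_lens_instruction(instr)
--         hash_val = hash(label[0])
--         if label[1] == None:
--             lenses[hash_val].pop(label[0], None)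
--         else:
--             lenses[hash_val][label[0]] = label[1]
--     return lenses
-- ===== SOURCE B (Python) =====
-- def hash(str):
--     hash_value = 0
--     for ch in str:
--         hash_value += ord(ch)
--         hash_value = (hash_value * 17) % 256
--     return hash_value
--
-- def _bucket(flat, i):
--     box = {}
--     for label, value in flat.items():
--         if hash(label) == i:
--             box[label] = value
--     return box
--
-- def arrange_lenses(instructions):
--     # One flat label->value dict with Python's overwrite-in-place / pop semantics,
--     # distributed into the 256 hash buckets only at the end.
--     flat = {}
--     for instr in instructions:
--         if instr[-1] == '-':
--             flat.pop(instr[:-1], None)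
--         else:
--             flat[instr[:-2]] = int(instr[-1])
--     return [_bucket(flat, i) for i in range(256)]
-- ===== Notes on version B (the rewrite author's own statement) =====
-- stated objective: alternative
-- what changed: A keeps 256 per-box dicts and updates the box lenses[hash(label)] on every instruction; B runs the whole pass on a single flat label->value dict (overwrite-in-place insert / pop) and only afterwards distributes its entries into the 256 hash buckets.
import Mathlib
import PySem

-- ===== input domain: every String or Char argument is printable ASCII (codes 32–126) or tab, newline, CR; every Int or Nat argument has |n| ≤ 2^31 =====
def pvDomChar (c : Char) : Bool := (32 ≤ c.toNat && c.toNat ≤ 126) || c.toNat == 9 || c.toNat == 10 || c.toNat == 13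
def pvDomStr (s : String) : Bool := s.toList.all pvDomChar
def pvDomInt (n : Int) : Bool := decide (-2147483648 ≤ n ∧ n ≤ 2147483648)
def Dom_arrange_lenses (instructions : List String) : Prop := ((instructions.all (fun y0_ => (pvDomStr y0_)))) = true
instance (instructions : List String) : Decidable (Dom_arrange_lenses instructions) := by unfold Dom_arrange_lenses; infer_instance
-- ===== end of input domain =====

-- B replaces A's 256 per-box dicts updated during the pass by ONE flat label→value dict,
-- distributed into the 256 hash buckets only after the pass (alternative decomposition).


-- ===== PORT A =====
-- helper `hash` (identical in Source A and Source B; shared by both ports)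
def pyhash (s : String) : Int :=
  s.toList.foldl (fun hash_value ch => PySem.Int.mod ((hash_value + (ch.toNat : Int)) * 17) 256) 0

-- helper `parse_lens_instruction`: (label, None) for a '-' instruction, else (label, int(last char)).
-- `int(instr[-1])` raises unless the last char is a digit — Pre_ excludes that, so the `.getD 0` is unreachable inside Pre_.
def parse_lens_instruction (instr : String) : String × Option Int :=
  if PySem.Str.pyGet? instr (-1) = some '-' then
    (PySem.Str.slice instr none (some (-1)), none)
  else
    (PySem.Str.slice instr none (some (-2)),
      some (((PySem.Str.pyGet? instr (-1)).bind (fun c => PySem.Int.ofChars? [c])).getD 0))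

-- loop body of A: mutate the box `lenses[hash_val]` (pop the label / set the label).
-- `hash_val` is always in [0, 256) (pyhash is a mod-256 value), so the `.getD` default and the
-- clamping of `.set` are unreachable: this is exactly Python's in-place `lenses[hash_val]` update.
def stepA (lenses : List (PySem.Dict String Int)) (instr : String) : List (PySem.Dict String Int) :=
  let label := parse_lens_instruction instr
  let hash_val := pyhash label.1
  let box := (PySem.List.pyGet? lenses hash_val).getD PySem.Dict.empty
  if label.2 = none then
    lenses.set hash_val.toNat (box.erase label.1)
  else
    lenses.set hash_val.toNat (box.insert label.1 (label.2.getD 0))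

def arrange_lenses (instructions : List String) : List (List (String × Int)) :=
  (instructions.foldl stepA (List.replicate 256 PySem.Dict.empty)).map PySem.Dict.items

-- ===== PORT B =====
-- loop body of B: one flat dict, `pop(label, None)` / overwrite-in-place insert.
def stepB (flat : PySem.Dict String Int) (instr : String) : PySem.Dict String Int :=
  if PySem.Str.pyGet? instr (-1) = some '-' then
    flat.erase (PySem.Str.slice instr none (some (-1)))
  else
    flat.insert (PySem.Str.slice instr none (some (-2)))
      (((PySem.Str.pyGet? instr (-1)).bind (fun c => PySem.Int.ofChars? [c])).getD 0)

-- helper `_bucket`: collect the entries of `flat` whose label hashes to i, in order.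
def bucket (flat : PySem.Dict String Int) (i : Int) : PySem.Dict String Int :=
  flat.items.foldl
    (fun box p => if pyhash p.1 == i then box.insert p.1 p.2 else box)
    PySem.Dict.empty

def arrange_lenses_alt (instructions : List String) : List (List (String × Int)) :=
  let flat := instructions.foldl stepB PySem.Dict.empty
  (PySem.List.pyRange 0 256 1).map (fun i => (bucket flat i).items)

-- ===== PRECONDITION & SPEC =====
-- Pre_ excludes exactly the inputs on which Python A raises: an empty instruction
-- (IndexError on instr[-1]) or one whose last char is neither '-' nor a digit (ValueError in int()).
def Pre_arrange_lenses (instructions : List String) : Prop :=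
  ∀ instr ∈ instructions,
    (instr.toList.getLast?.elim false (fun c => c == '-' || PySem.Chars.isdigit c)) = true
instance (instructions : List String) : Decidable (Pre_arrange_lenses instructions) := by
  unfold Pre_arrange_lenses; infer_instance

def pvWitness_arrange_lenses : List String := ["rn=1", "cm-", "rn=9", "qp=3"]

def Spec_arrange_lenses (instructions : List String) (out : List (List (String × Int))) : Prop := out = arrange_lenses_alt instructions
instance (instructions : List String) (out : List (List (String × Int))) : Decidable (Spec_arrange_lenses instructions out) := by unfold Spec_arrange_lenses; infer_instance

-- ===== CLAIM (what is proved, stated in full; the proofs are below) =====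
def Claim_equal_arrange_lenses : Prop := ∀ (instructions : List String), Dom_arrange_lenses instructions → Pre_arrange_lenses instructions → Spec_arrange_lenses instructions (arrange_lenses instructions)

-- ===== LEMMAS AND PROOFS =====

-- A's state as a function of B's state: box n holds the entries of flat whose label hashes to n.
def pvBuckets (flat : PySem.Dict String Int) : List (PySem.Dict String Int) :=
  (List.range 256).map
    (fun n : Nat => PySem.Dict.mk (flat.items.filter (fun p => pyhash p.1 == (n : Int))))

theorem pyhash_bounds_aux (cs : List Char) (a : Int) (h0 : 0 ≤ a) (h1 : a < 256) :
    0 ≤ cs.foldl (fun hash_value ch => PySem.Int.mod ((hash_value + (ch.toNat : Int)) * 17) 256) a ∧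
      cs.foldl (fun hash_value ch => PySem.Int.mod ((hash_value + (ch.toNat : Int)) * 17) 256) a < 256 := by
  induction cs generalizing a with
  | nil => exact ⟨h0, h1⟩
  | cons c cs ih =>
      exact ih _ (PySem.Int.mod_nonneg _ (by norm_num)) (PySem.Int.mod_lt _ (by norm_num))

theorem pyhash_bounds (s : String) : 0 ≤ pyhash s ∧ pyhash s < 256 :=
  pyhash_bounds_aux s.toList 0 (by norm_num) (by norm_num)

theorem pv_erase_eq (d : PySem.Dict String Int) (k : String) :
    d.erase k = PySem.Dict.mk (d.items.filter (fun p => !(p.1 == k))) := by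
  simp [PySem.Dict.erase]

theorem pv_contains_eq (d : PySem.Dict String Int) (k : String) :
    d.contains k = d.items.any (fun p => p.1 == k) := by
  simp [PySem.Dict.contains]

theorem pv_keys_eq (d : PySem.Dict String Int) : d.keys = d.items.map Prod.fst := by
  simp [PySem.Dict.keys]

set_option maxRecDepth 4096 in
theorem pyRange256 : PySem.List.pyRange 0 256 1 = (List.range 256).map (fun n : Nat => (n : Int)) := by
  decide

theorem set_map_range {α : Type} (f g : Nat → α) (n j : Nat) (_hj : j < n) (x : α)
    (hx : x = g j) (hother : ∀ i, i < n → i ≠ j → f i = g i) :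
    ((List.range n).map f).set j x = (List.range n).map g := by
  apply List.ext_getElem
  · simp
  · intro i h1 h2
    simp only [List.length_set, List.length_map, List.length_range] at h1 h2
    simp only [List.getElem_set, List.getElem_map, List.getElem_range]
    by_cases hij : j = i
    · rw [if_pos hij, hx, hij]
    · rw [if_neg hij]
      exact hother i h2 (fun h => hij h.symm)

theorem erase_self_bucket (flat : PySem.Dict String Int) (l : String) :
    (PySem.Dict.mk (flat.items.filter (fun p => pyhash p.1 == pyhash l))).erase l
      = PySem.Dict.mk ((flat.erase l).items.filter (fun p => pyhash p.1 == pyhash l)) := by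
  rw [pv_erase_eq, pv_erase_eq]
  apply PySem.Dict.ext
  simp only [List.filter_filter]
  exact List.filter_congr (fun p _ => Bool.and_comm _ _)

theorem erase_other_bucket (flat : PySem.Dict String Int) (l : String) (i : Int)
    (hne : i ≠ pyhash l) :
    PySem.Dict.mk (flat.items.filter (fun p => pyhash p.1 == i))
      = PySem.Dict.mk ((flat.erase l).items.filter (fun p => pyhash p.1 == i)) := by
  rw [pv_erase_eq]
  apply PySem.Dict.ext
  simp only [List.filter_filter]
  apply List.filter_congr
  intro p _
  by_cases hpl : p.1 = l
  · have h1 : (pyhash p.1 == i) = false := by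
      simp only [beq_eq_false_iff_ne, hpl]
      exact fun h => hne h.symm
    simp [h1]
  · simp [hpl]

theorem contains_bucket (flat : PySem.Dict String Int) (l : String) :
    (PySem.Dict.mk (flat.items.filter (fun p => pyhash p.1 == pyhash l))).contains l
      = flat.contains l := by
  rw [pv_contains_eq, pv_contains_eq]
  simp only [List.any_filter]
  congr 1
  funext p
  by_cases hpl : p.1 = l <;> simp [hpl]

theorem insert_self_bucket (flat : PySem.Dict String Int) (l : String) (v : Int) :
    (PySem.Dict.mk (flat.items.filter (fun p => pyhash p.1 == pyhash l))).insert l v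
      = PySem.Dict.mk ((flat.insert l v).items.filter (fun p => pyhash p.1 == pyhash l)) := by
  apply PySem.Dict.ext
  cases hcont : flat.contains l with
  | true =>
      rw [PySem.Dict.items_insert_of_contains _ v ((contains_bucket flat l).trans hcont)]
      rw [PySem.Dict.items_insert_of_contains _ v hcont]
      rw [List.filter_map]
      congr 1
      apply List.filter_congr
      intro p _
      by_cases hpl : p.1 = l <;> simp [Function.comp, hpl]
  | false =>
      rw [PySem.Dict.items_insert_of_not_contains _ v ((contains_bucket flat l).trans hcont)]
      rw [PySem.Dict.items_insert_of_not_contains _ v hcont]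
      rw [List.filter_append]
      simp

theorem insert_other_bucket (flat : PySem.Dict String Int) (l : String) (v : Int) (i : Int)
    (hne : i ≠ pyhash l) :
    PySem.Dict.mk (flat.items.filter (fun p => pyhash p.1 == i))
      = PySem.Dict.mk ((flat.insert l v).items.filter (fun p => pyhash p.1 == i)) := by
  apply PySem.Dict.ext
  cases hcont : flat.contains l with
  | true =>
      rw [PySem.Dict.items_insert_of_contains _ v hcont]
      rw [List.filter_map]
      have hpred : ∀ p ∈ flat.items, ((fun p : String × Int => pyhash p.1 == i) ∘
          (fun p : String × Int => if (p.1 == l) = true then (l, v) else p)) p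
          = (pyhash p.1 == i) := by
        intro p _
        by_cases hpl : p.1 = l <;> simp [Function.comp, hpl]
      rw [List.filter_congr hpred]
      have hid : ∀ p ∈ flat.items.filter (fun p => pyhash p.1 == i),
          (fun p : String × Int => if (p.1 == l) = true then (l, v) else p) p = p := by
        intro p hp
        have hh : pyhash p.1 = i := by
          have := (List.mem_filter.mp hp).2
          simpa using this
        by_cases hpl : p.1 = l
        · exact absurd (hpl ▸ hh).symm hne
        · simp [hpl]
      rw [List.map_congr_left hid]
      simp
  | false =>
      rw [PySem.Dict.items_insert_of_not_contains _ v hcont]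
      rw [List.filter_append]
      have h1 : (pyhash l == i) = false := by
        simp only [beq_eq_false_iff_ne]
        exact fun h => hne h.symm
      simp [h1]

theorem pv_get_bucket (flat : PySem.Dict String Int) (h : Int) (hge : 0 ≤ h) (hlt : h < 256) :
    (PySem.List.pyGet? (pvBuckets flat) h).getD PySem.Dict.empty
      = PySem.Dict.mk (flat.items.filter (fun p => pyhash p.1 == (h.toNat : Int))) := by
  unfold pvBuckets
  rw [PySem.List.pyGet?_of_nonneg _ hge, List.getElem?_map, List.getElem?_range (by omega)]
  rfl

theorem step_commute (flat : PySem.Dict String Int) (instr : String) :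
    stepA (pvBuckets flat) instr = pvBuckets (stepB flat instr) := by
  by_cases hc : PySem.Str.pyGet? instr (-1) = some '-'
  · -- removal
    simp only [stepA, stepB, parse_lens_instruction, if_pos hc]
    set l := PySem.Str.slice instr none (some (-1)) with hl
    obtain ⟨hge, hlt⟩ := pyhash_bounds l
    have hcast : ((pyhash l).toNat : Int) = pyhash l := by omega
    rw [pv_get_bucket flat (pyhash l) hge hlt]
    simp only [ite_true]
    unfold pvBuckets
    apply set_map_range _ _ 256 (pyhash l).toNat (by omega)
    · rw [hcast]
      exact erase_self_bucket flat l
    · intro i hi hne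
      have hine : (i : Int) ≠ pyhash l := by omega
      exact erase_other_bucket flat l (i : Int) hine
  · -- insertion
    simp only [stepA, stepB, parse_lens_instruction, if_neg hc]
    set l := PySem.Str.slice instr none (some (-2)) with hl
    set v := ((PySem.Str.pyGet? instr (-1)).bind (fun c => PySem.Int.ofChars? [c])).getD 0 with hv
    obtain ⟨hge, hlt⟩ := pyhash_bounds l
    have hcast : ((pyhash l).toNat : Int) = pyhash l := by omega
    rw [pv_get_bucket flat (pyhash l) hge hlt]
    simp only [reduceCtorEq, ite_false, Option.getD_some]
    unfold pvBuckets
    apply set_map_range _ _ 256 (pyhash l).toNat (by omega)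
    · rw [hcast]
      exact insert_self_bucket flat l v
    · intro i hi hne
      have hine : (i : Int) ≠ pyhash l := by omega
      exact insert_other_bucket flat l v (i : Int) hine

theorem nodup_stepB (flat : PySem.Dict String Int) (instr : String)
    (hn : flat.keys.Nodup) : (stepB flat instr).keys.Nodup := by
  unfold stepB
  split
  · rw [pv_erase_eq, pv_keys_eq]
    rw [pv_keys_eq] at hn
    exact hn.sublist (List.Sublist.map _ (List.filter_sublist))
  · exact PySem.Dict.nodup_keys_insert _ _ _ hn

theorem nodup_filter_keys (d : PySem.Dict String Int) (p : String × Int → Bool)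
    (h : d.keys.Nodup) : ((d.items.filter p).map Prod.fst).Nodup := by
  rw [pv_keys_eq] at h
  exact h.sublist (List.Sublist.map _ (List.filter_sublist))

theorem bucket_eq (flat : PySem.Dict String Int) (hn : flat.keys.Nodup) (i : Int) :
    bucket flat i = PySem.Dict.mk (flat.items.filter (fun p => pyhash p.1 == i)) := by
  unfold bucket
  rw [PySem.List.foldl_if_eq_foldl_filter]
  apply PySem.Dict.ext
  rw [PySem.Dict.items_foldl_insert_fresh _ Prod.fst Prod.snd _
        (fun a _ => PySem.Dict.contains_empty _) (nodup_filter_keys flat _ hn)]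
  have : (PySem.Dict.empty : PySem.Dict String Int).items = [] := rfl
  simp [this]

theorem fold_commute (instrs : List String) (d : PySem.Dict String Int) :
    instrs.foldl stepA (pvBuckets d) = pvBuckets (instrs.foldl stepB d) := by
  induction instrs generalizing d with
  | nil => rfl
  | cons instr rest ih =>
      rw [List.foldl_cons, List.foldl_cons, step_commute d instr]
      exact ih _

theorem nodup_fold (instrs : List String) (d : PySem.Dict String Int) (hn : d.keys.Nodup) :
    (instrs.foldl stepB d).keys.Nodup := by
  induction instrs generalizing d with
  | nil => exact hn
  | cons instr rest ih => exact ih _ (nodup_stepB d instr hn)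

theorem buckets_empty : pvBuckets PySem.Dict.empty = List.replicate 256 PySem.Dict.empty := by
  unfold pvBuckets
  have h1 : (PySem.Dict.empty : PySem.Dict String Int).items = [] := rfl
  rw [h1]
  have h2 : ∀ n : Nat, (fun n : Nat => PySem.Dict.mk
      (([] : List (String × Int)).filter (fun p => pyhash p.1 == (n : Int)))) n
      = (PySem.Dict.empty : PySem.Dict String Int) := fun n => rfl
  rw [List.map_congr_left (fun n _ => h2 n), List.map_const', List.length_range]

-- ===== VERDICT (by name: the statement is the Claim_ definition above) =====
theorem arrange_lenses_spec : Claim_equal_arrange_lenses := by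
  intro instructions _ _
  unfold Spec_arrange_lenses arrange_lenses arrange_lenses_alt
  have hn : (instructions.foldl stepB PySem.Dict.empty).keys.Nodup :=
    nodup_fold instructions _ PySem.Dict.nodup_keys_empty
  rw [← buckets_empty, fold_commute instructions _]
  rw [pyRange256, List.map_map]
  unfold pvBuckets
  rw [List.map_map]
  apply List.map_congr_left
  intro n _
  simp only [Function.comp]
  rw [bucket_eq _ hn]
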